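-- pv_equiv track=rewrite | github.com/Sandmanmmm/Receipt-Generator | generators/shopify_product_csv_generator.py | generate_handle
-- ===== SOURCE A (Python) =====
-- def generate_handle(title: str) -> str:
--     """Generate URL-safe handle from title."""
--     handle = title.lower()
--     # Replace special characters
--     for char in ["'", '"', "&", "/", "\\", "(", ")", "[", "]", "{", "}", ",", ".", "!"]:
--         handle = handle.replace(char, "")
--     # Replace spaces and multiple dashes
--     handle = handle.replace(" ", "-")
--     while "--" in handle:
--         handle = handle.replace("--", "-")
--     handle = handle.strip("-")
--     return handle[:50]  # Limit length
-- ===== SOURCE B (Python) =====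
-- def generate_handle(title: str) -> str:
--     """Generate URL-safe handle from title (single pass instead of repeated replace)."""
--     removed = set("'\"&/\\()[]{},.!")
--     out = []
--     for c in title.lower():
--         if c in removed:
--             continue
--         if c == ' ' or c == '-':
--             # emit a dash only when something was emitted and it was not a dash
--             if out and out[-1] != '-':
--                 out.append('-')
--         else:
--             out.append(c)
--     if out and out[-1] == '-':
--         out.pop()
--     return ''.join(out)[:50]
-- ===== Notes on version B (the rewrite author's own statement) =====
-- stated objective: simpler
-- what changed: Replaces A's 14 whole-string replace passes plus a quadratic while-loop dash-collapse and final strip with one left-to-right pass that skips removed characters, emits at most one dash per run, never emits a leading dash, and pops at most one trailing dash.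
import Mathlib
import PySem

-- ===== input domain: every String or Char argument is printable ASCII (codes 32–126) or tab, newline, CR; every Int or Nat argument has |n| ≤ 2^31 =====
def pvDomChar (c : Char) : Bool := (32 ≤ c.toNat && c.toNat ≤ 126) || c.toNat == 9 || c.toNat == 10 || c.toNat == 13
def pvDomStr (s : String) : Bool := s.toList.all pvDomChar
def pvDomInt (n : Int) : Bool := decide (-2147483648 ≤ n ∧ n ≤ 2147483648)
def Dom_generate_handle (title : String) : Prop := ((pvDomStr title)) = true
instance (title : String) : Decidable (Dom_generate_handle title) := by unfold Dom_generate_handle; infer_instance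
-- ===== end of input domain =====

-- B is a single left-to-right pass (skip removed chars, emit at most one dash per
-- space/dash run, no leading dash, pop one trailing dash) instead of A's chain of
-- whole-string replace passes, a while-loop dash collapse, strip and truncate.

-- ===== PORT A =====
-- helpers needed by the port's termination proof (cited in decreasing_by):
-- pvRep2 is one pass of Python's s.replace("--", "-") (leftmost, non-overlapping).
def pvRep2 : List Char → List Char
  | [] => []
  | [c] => [c]
  | c :: d :: rest => if c = '-' ∧ d = '-' then '-' :: pvRep2 rest else c :: pvRep2 (d :: rest)

def pvHasDD : List Char → Bool
  | c :: d :: rest => (c == '-' && d == '-') || pvHasDD (d :: rest)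
  | _ => false

theorem pvReplace_go_dd (fuel : Nat) (l acc : List Char) (h : l.length ≤ fuel) :
    PySem.Chars.replace.go ['-','-'] ['-'] fuel l acc = acc.reverse ++ pvRep2 l := by
  induction fuel generalizing l acc with
  | zero =>
    have : l = [] := by cases l with | nil => rfl | cons a t => simp at h
    subst this; simp [PySem.Chars.replace.go, pvRep2]
  | succ n ih =>
    match l with
    | [] => simp [PySem.Chars.replace.go, pvRep2]
    | [c] =>
      rw [PySem.Chars.replace.go]
      have : (['-','-'] : List Char).isPrefixOf [c] = false := by
        simp [List.isPrefixOf]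
      rw [this]
      simp only [Bool.false_eq_true, if_false]
      rw [ih [] _ (by simp)]
      simp [pvRep2]
    | c :: d :: t =>
      rw [PySem.Chars.replace.go]
      simp only [List.length_cons] at h
      by_cases hcd : c = '-' ∧ d = '-'
      · obtain ⟨rfl, rfl⟩ := hcd
        have : (['-','-'] : List Char).isPrefixOf ('-' :: '-' :: t) = true := by
          simp [List.isPrefixOf]
        rw [this]
        simp only [if_pos rfl]
        rw [show (List.drop (['-','-'] : List Char).length ('-'::'-'::t)) = t from rfl]
        rw [ih t _ (by omega)]
        simp [pvRep2]
      · have : (['-','-'] : List Char).isPrefixOf (c :: d :: t) = false := by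
          simp only [List.isPrefixOf, Bool.and_eq_false_iff]
          rcases (Decidable.not_and_iff_not_or_not.mp hcd) with h1 | h1
          · left; exact beq_eq_false_iff_ne.mpr (fun e => h1 e.symm)
          · right; left; exact beq_eq_false_iff_ne.mpr (fun e => h1 e.symm)
        rw [this]
        simp only [Bool.false_eq_true, if_false]
        rw [ih (d :: t) _ (by simp; omega)]
        simp [pvRep2, hcd]

theorem pvReplace_dd (s : List Char) :
    PySem.Chars.replace s ['-','-'] ['-'] = pvRep2 s := by
  rw [PySem.Chars.replace]
  simp only [List.isEmpty_cons, Bool.false_eq_true, if_false]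
  simpa using pvReplace_go_dd s.length s [] le_rfl

theorem pvRep2_le (l : List Char) : (pvRep2 l).length ≤ l.length := by
  fun_induction pvRep2 <;> simp_all <;> omega

theorem pvRep2_lt (l : List Char) (h : pvHasDD l = true) : (pvRep2 l).length < l.length := by
  fun_induction pvRep2 with
  | case1 => simp [pvHasDD] at h
  | case2 c => simp [pvHasDD] at h
  | case3 c d rest hcd ih =>
    have := pvRep2_le rest
    simp [pvRep2, hcd]
    omega
  | case4 c d rest hcd ih =>
    simp only [pvHasDD, Bool.or_eq_true, Bool.and_eq_true, beq_iff_eq] at h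
    rcases h with ⟨h1, h2⟩ | h
    · exact absurd ⟨h1, h2⟩ hcd
    · have := ih h
      simp [pvRep2, hcd]
      simp at this
      omega

theorem pvHasDD_of_infix (l : List Char) (h : ['-','-'] <:+: l) : pvHasDD l = true := by
  induction l with
  | nil => simp at h
  | cons a t ih =>
    rcases List.infix_cons_iff.mp h with hp | hi
    · match t, hp with
      | d :: t', hp =>
        have : a = '-' ∧ d = '-' := by
          rcases hp with ⟨r, hr⟩
          simp at hr
          exact ⟨hr.1.symm, hr.2.1.symm⟩
        simp [pvHasDD, this.1, this.2]
    · match t with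
      | [] => simp at hi
      | d :: t' => simp [pvHasDD, ih hi]

-- the Python 'while "--" in handle: handle = handle.replace("--", "-")'
def pvCollapse (s : List Char) : List Char :=
  if h : PySem.Chars.isIn ['-','-'] s = true then
    pvCollapse (PySem.Chars.replace s ['-','-'] ['-'])
  else s
termination_by s.length
decreasing_by
  rw [pvReplace_dd]
  exact pvRep2_lt s (pvHasDD_of_infix s ((PySem.Chars.isIn_iff_infix _ _).mp h))

def generate_handle (title : String) : String :=
  let handle := PySem.Chars.lower title.toList
  let handle := PySem.Chars.replace handle ['\''] []
  let handle := PySem.Chars.replace handle ['"'] []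
  let handle := PySem.Chars.replace handle ['&'] []
  let handle := PySem.Chars.replace handle ['/'] []
  let handle := PySem.Chars.replace handle ['\\'] []
  let handle := PySem.Chars.replace handle ['('] []
  let handle := PySem.Chars.replace handle [')'] []
  let handle := PySem.Chars.replace handle ['['] []
  let handle := PySem.Chars.replace handle [']'] []
  let handle := PySem.Chars.replace handle ['{'] []
  let handle := PySem.Chars.replace handle ['}'] []
  let handle := PySem.Chars.replace handle [','] []
  let handle := PySem.Chars.replace handle ['.'] []
  let handle := PySem.Chars.replace handle ['!'] []
  let handle := PySem.Chars.replace handle [' '] ['-']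
  let handle := pvCollapse handle
  let handle := PySem.Chars.stripChars handle ['-']
  String.ofList (PySem.List.slice handle none (some 50))

-- ===== PORT B =====
def pvRemovedSet : PySem.Set Char :=
  PySem.Set.ofList ['\'', '"', '&', '/', '\\', '(', ')', '[', ']', '{', '}', ',', '.', '!']

def pvBStep (out : List Char) (c : Char) : List Char :=
  if pvRemovedSet.contains c then out
  else if c = ' ' ∨ c = '-' then
    match out.getLast? with            -- 'if out and out[-1] != '-''
    | some d => if d ≠ '-' then out ++ ['-'] else out
    | none => out
  else out ++ [c]

def generate_handle_alt (title : String) : String :=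
  let out := (PySem.Chars.lower title.toList).foldl pvBStep []
  let out := if out.getLast? = some '-' then out.dropLast else out
  String.ofList (PySem.List.slice out none (some 50))

-- ===== PRECONDITION & SPEC =====
def Spec_generate_handle (title : String) (out : String) : Prop := out = generate_handle_alt title
instance (title : String) (out : String) : Decidable (Spec_generate_handle title out) := by unfold Spec_generate_handle; infer_instance

-- ===== CLAIM (what is proved, stated in full; the proofs are below) =====
def Claim_equal_generate_handle : Prop := ∀ (title : String), Dom_generate_handle title → Spec_generate_handle title (generate_handle title)

-- ===== LEMMAS AND PROOFS =====

-- kept characters and the space→dash map, as B sees them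
def pvKeep (c : Char) : Bool := !(pvRemovedSet.contains c)
def pvDash (c : Char) : Char := if c = ' ' then '-' else c

-- dash-run squeezer: flag b = "a dash here would be suppressed" (start / just emitted a dash)
def pvSq : Bool → List Char → List Char
  | _, [] => []
  | b, c :: rest =>
    if c = '-' then (if b then pvSq true rest else '-' :: pvSq true rest)
    else c :: pvSq false rest

theorem pvReplace_go_del (x : Char) (fuel : Nat) (l acc : List Char) (h : l.length ≤ fuel) :
    PySem.Chars.replace.go [x] [] fuel l acc = acc.reverse ++ l.filter (fun c => c != x) := by
  induction fuel generalizing l acc with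
  | zero =>
    have : l = [] := by cases l with | nil => rfl | cons a t => simp at h
    subst this; simp [PySem.Chars.replace.go]
  | succ n ih =>
    match l with
    | [] => simp [PySem.Chars.replace.go]
    | c :: t =>
      rw [PySem.Chars.replace.go]
      simp only [List.length_cons] at h
      by_cases hx : x = c
      · subst hx
        have : ([x] : List Char).isPrefixOf (x :: t) = true := by simp [List.isPrefixOf]
        rw [this]
        simp only [if_pos rfl]
        rw [show (List.drop ([x] : List Char).length (x::t)) = t from rfl]
        rw [ih t _ (by omega)]
        simp [List.filter]
      · have : ([x] : List Char).isPrefixOf (c :: t) = false := by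
          simp only [List.isPrefixOf, List.isPrefixOf_nil_left, Bool.and_true]
          exact beq_eq_false_iff_ne.mpr hx
        rw [this]
        simp only [Bool.false_eq_true, if_false]
        rw [ih t _ (by omega)]
        have hcx : (c != x) = true := bne_iff_ne.mpr (fun e => hx (Eq.symm e))
        simp [List.filter, hcx]

theorem pvReplace_del (s : List Char) (x : Char) :
    PySem.Chars.replace s [x] [] = s.filter (fun c => c != x) := by
  rw [PySem.Chars.replace]
  simp only [List.isEmpty_cons, Bool.false_eq_true, if_false]
  simpa using pvReplace_go_del x s.length s [] le_rfl

theorem pvReplace_go_map (a b : Char) (fuel : Nat) (l acc : List Char) (h : l.length ≤ fuel) :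
    PySem.Chars.replace.go [a] [b] fuel l acc = acc.reverse ++ l.map (fun c => if c = a then b else c) := by
  induction fuel generalizing l acc with
  | zero =>
    have : l = [] := by cases l with | nil => rfl | cons a t => simp at h
    subst this; simp [PySem.Chars.replace.go]
  | succ n ih =>
    match l with
    | [] => simp [PySem.Chars.replace.go]
    | c :: t =>
      rw [PySem.Chars.replace.go]
      simp only [List.length_cons] at h
      by_cases hx : a = c
      · subst hx
        have : ([a] : List Char).isPrefixOf (a :: t) = true := by simp [List.isPrefixOf]
        rw [this]
        simp only [if_pos rfl]
        rw [show (List.drop ([a] : List Char).length (a::t)) = t from rfl]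
        rw [ih t _ (by omega)]
        simp
      · have : ([a] : List Char).isPrefixOf (c :: t) = false := by
          simp only [List.isPrefixOf, List.isPrefixOf_nil_left, Bool.and_true]
          exact beq_eq_false_iff_ne.mpr hx
        rw [this]
        simp only [Bool.false_eq_true, if_false]
        rw [ih t _ (by omega)]
        simp only [List.reverse_cons, List.append_assoc, List.singleton_append, List.map]
        rw [if_neg (fun e => hx (Eq.symm e))]

theorem pvReplace_map (s : List Char) :
    PySem.Chars.replace s [' '] ['-'] = s.map pvDash := by
  rw [PySem.Chars.replace]
  simp only [List.isEmpty_cons, Bool.false_eq_true, if_false]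
  simpa [pvDash] using pvReplace_go_map ' ' '-' s.length s [] le_rfl

theorem pvFilter_chain (s : List Char) :
    ((((((((((((((s.filter (fun c => c != '\'')).filter (fun c => c != '"')).filter
      (fun c => c != '&')).filter (fun c => c != '/')).filter (fun c => c != '\\')).filter
      (fun c => c != '(')).filter (fun c => c != ')')).filter (fun c => c != '[')).filter
      (fun c => c != ']')).filter (fun c => c != '{')).filter (fun c => c != '}')).filter
      (fun c => c != ',')).filter (fun c => c != '.')).filter (fun c => c != '!')) =
    s.filter pvKeep := by
  simp only [List.filter_filter]
  apply List.filter_congr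
  intro c _
  show _ = pvKeep c
  have hset : pvRemovedSet = ['\'', '"', '&', '/', '\\', '(', ')', '[', ']', '{', '}', ',', '.', '!'] := by decide
  by_cases hm : c ∈ (['\'', '"', '&', '/', '\\', '(', ')', '[', ']', '{', '}', ',', '.', '!'] : List Char)
  · fin_cases hm <;> decide
  · simp only [List.mem_cons, List.not_mem_nil, or_false, not_or] at hm
    obtain ⟨h1,h2,h3,h4,h5,h6,h7,h8,h9,h10,h11,h12,h13,h14⟩ := hm
    simp [pvKeep, hset, List.contains_cons, bne, h1,h2,h3,h4,h5,h6,h7,h8,h9,h10,h11,h12,h13,h14]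

theorem pvSq_rep2 (l : List Char) (b : Bool) : pvSq b (pvRep2 l) = pvSq b l := by
  fun_induction pvRep2 generalizing b with
  | case1 => rfl
  | case2 c => rfl
  | case3 c d rest hcd ih =>
    obtain ⟨rfl, rfl⟩ := hcd
    cases b <;> simp [pvSq, ih]
  | case4 c d rest hcd ih =>
    by_cases hc : c = '-'
    · subst hc
      have hd : ¬ d = '-' := fun e => hcd ⟨rfl, e⟩
      cases b <;> simp [pvSq, hd, ih]
    · cases b <;> simp [pvSq, hc, ih]

theorem pvSq_false_id : ∀ l, pvHasDD l = false → pvSq false l = l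
  | [], _ => rfl
  | [c], _ => by by_cases hc : c = '-' <;> simp [pvSq, hc]
  | c :: d :: rest, h => by
    simp only [pvHasDD, Bool.or_eq_false_iff, Bool.and_eq_false_iff] at h
    have ih := pvSq_false_id (d :: rest) h.2
    by_cases hc : c = '-'
    · subst hc
      have hd : ¬ d = '-' := by
        rcases h.1 with h1 | h1
        · simp at h1
        · exact fun e => by simp [e] at h1
      have ih' : pvSq false rest = rest := by simpa [pvSq, hd] using ih
      simp [pvSq, hd, ih']
    · simp [pvSq, hc] at ih ⊢
      exact ih

theorem pvInfix_of_hasDD (l : List Char) (h : pvHasDD l = true) : ['-','-'] <:+: l := by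
  induction l with
  | nil => simp [pvHasDD] at h
  | cons a t ih =>
    match t with
    | [] => simp [pvHasDD] at h
    | d :: t' =>
      simp only [pvHasDD, Bool.or_eq_true, Bool.and_eq_true, beq_iff_eq] at h
      rcases h with ⟨rfl, rfl⟩ | h
      · exact ⟨[], t', rfl⟩
      · exact (ih h).trans (List.suffix_cons a (d :: t')).isInfix

theorem pvCollapse_eq (s : List Char) : pvCollapse s = pvSq false s := by
  rw [pvCollapse]
  by_cases h : PySem.Chars.isIn ['-','-'] s = true
  · rw [dif_pos h, pvReplace_dd]
    rw [pvCollapse_eq (pvRep2 s)]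
    exact pvSq_rep2 s false
  · rw [dif_neg h]
    refine (pvSq_false_id s ?_).symm
    rcases hdd : pvHasDD s with _ | _
    · rfl
    · exact absurd ((PySem.Chars.isIn_iff_infix _ _).mpr (pvInfix_of_hasDD s hdd)) h
termination_by s.length
decreasing_by exact pvRep2_lt s (pvHasDD_of_infix s ((PySem.Chars.isIn_iff_infix _ _).mp h))

theorem pvSq_true_head (l : List Char) : (pvSq true l).head? ≠ some '-' := by
  induction l with
  | nil => simp [pvSq]
  | cons c rest ih =>
    by_cases hc : c = '-'
    · subst hc; simpa [pvSq] using ih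
    · simp [pvSq, hc]

theorem pvHasDD_cons_of (c : Char) (t : List Char) (h1 : t.head? = some '-' → c ≠ '-')
    (h2 : pvHasDD t = false) : pvHasDD (c :: t) = false := by
  match t with
  | [] => rfl
  | d :: t' =>
    simp only [pvHasDD, Bool.or_eq_false_iff, Bool.and_eq_false_iff]
    refine ⟨?_, h2⟩
    by_cases hd : d = '-'
    · subst hd
      left; exact beq_eq_false_iff_ne.mpr (h1 rfl)
    · right; exact beq_eq_false_iff_ne.mpr hd

theorem pvHasDD_sq (l : List Char) (b : Bool) : pvHasDD (pvSq b l) = false := by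
  induction l generalizing b with
  | nil => rfl
  | cons c rest ih =>
    by_cases hc : c = '-'
    · subst hc
      cases b with
      | true => simpa [pvSq] using ih true
      | false =>
        simp only [pvSq, if_pos rfl, Bool.false_eq_true, if_false]
        exact pvHasDD_cons_of '-' _ (fun h => absurd h (pvSq_true_head rest)) (ih true)
    · simp only [pvSq, if_neg hc]
      exact pvHasDD_cons_of c _ (fun _ => hc) (ih false)

theorem pvLstrip_sq (m : List Char) :
    (pvSq false m).dropWhile (fun c => (['-'] : List Char).contains c) = pvSq true m := by
  induction m with
  | nil => rfl
  | cons c rest ih =>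
    by_cases hc : c = '-'
    · subst hc
      have hh := pvSq_true_head rest
      simp only [pvSq, if_pos rfl, Bool.false_eq_true, if_false]
      cases hsq : pvSq true rest with
      | nil => simp
      | cons x xs =>
        have hx : ¬ x = '-' := by rw [hsq] at hh; simpa using fun e => hh (congrArg some e)
        simp [List.dropWhile_cons, hx]
    · simp [pvSq, hc, List.dropWhile_cons]

theorem pvLast_dash (t : List Char) (c : Char) (h : pvHasDD (t ++ [c]) = false)
    (hl : t.getLast? = some '-') : c ≠ '-' := by
  induction t with
  | nil => simp at hl
  | cons d t' ih =>
    match t' with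
    | [] =>
      simp at hl
      subst hl
      simp only [List.cons_append, List.nil_append, pvHasDD, Bool.or_eq_false_iff,
        Bool.and_eq_false_iff] at h
      rcases h.1 with h1 | h1
      · simp at h1
      · exact fun e => by simp [e] at h1
    | e :: t'' =>
      apply ih
      · simpa [pvHasDD] using (by
          simp only [List.cons_append, pvHasDD, Bool.or_eq_false_iff] at h
          exact h.2)
      · simpa using hl

theorem pvRstrip_no_dd (s : List Char) (h : pvHasDD s = false) :
    ((s.reverse.dropWhile (fun c => (['-'] : List Char).contains c)).reverse) =
      if s.getLast? = some '-' then s.dropLast else s := by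
  cases s using List.reverseRecOn with
  | nil => simp
  | append_singleton t c =>
    by_cases hc : c = '-'
    · subst hc
      rw [if_pos (by simp)]
      simp only [List.reverse_append, List.reverse_cons, List.reverse_nil, List.nil_append,
        List.singleton_append, List.dropWhile_cons, List.dropLast_concat]
      simp only [List.contains_cons, BEq.rfl, Bool.or_self, List.elem_nil, Bool.or_false, if_pos]
      cases ht : t.reverse with
      | nil => simp at ht; simp [ht]
      | cons x xs =>
        have hlast : t.getLast? = some x := by
          rw [← List.head?_reverse, ht]; rfl
        have hx : ¬ x = '-' := by
          intro e
          subst e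
          exact pvLast_dash t '-' h hlast rfl
        rw [List.dropWhile_cons, if_neg (by simpa using hx), ← ht]
        simp
    · rw [if_neg (by simp [hc])]
      simp only [List.reverse_append, List.reverse_cons, List.reverse_nil, List.nil_append,
        List.singleton_append, List.dropWhile_cons]
      rw [if_neg (by simpa using hc)]
      simp

theorem pvStrip_sq (m : List Char) :
    PySem.Chars.stripChars (pvSq false m) ['-'] =
      (if (pvSq true m).getLast? = some '-' then (pvSq true m).dropLast else pvSq true m) := by
  rw [PySem.Chars.stripChars]
  show ((List.dropWhile _ (List.dropWhile _ (pvSq false m)).reverse)).reverse = _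
  rw [show (List.dropWhile (fun c => (['-'] : List Char).contains c) (pvSq false m)) = pvSq true m
      from pvLstrip_sq m]
  exact pvRstrip_no_dd (pvSq true m) (pvHasDD_sq m true)

theorem pvFold_inv (l : List Char) (out : List Char) :
    l.foldl pvBStep out =
      out ++ pvSq (out.isEmpty || (out.getLast? == some '-')) ((l.filter pvKeep).map pvDash) := by
  induction l generalizing out with
  | nil => simp [pvSq]
  | cons c rest ih =>
    rw [List.foldl_cons]
    by_cases hrem : pvRemovedSet.contains c = true
    · have hmem : c ∈ pvRemovedSet := by simpa using hrem
      rw [show pvBStep out c = out by simp [pvBStep, hmem]]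
      rw [ih out]
      have : pvKeep c = false := by simp [pvKeep, hmem]
      simp [List.filter_cons, this]
    · have hmem : c ∉ pvRemovedSet := by simpa using hrem
      have hkeep : pvKeep c = true := by simp [pvKeep, hmem]
      by_cases hsp : c = ' ' ∨ c = '-'
      · have hdash : pvDash c = '-' := by
          rcases hsp with rfl | rfl
          · rfl
          · rfl
        cases hlast : out.getLast? with
        | none =>
          have hout : out = [] := List.getLast?_eq_none_iff.mp hlast
          subst hout
          rw [show pvBStep [] c = [] by rw [pvBStep]; simp [hmem, hsp]]
          rw [ih []]
          simp [List.filter_cons, hkeep, hdash, pvSq]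
        | some d =>
          have hne : out ≠ [] := by
            intro e; rw [e] at hlast; simp at hlast
          by_cases hd : d = '-'
          · subst hd
            rw [show pvBStep out c = out by rw [pvBStep]; simp [hmem, hsp, hlast]]
            rw [ih out]
            simp [List.filter_cons, hkeep, hdash, pvSq, hlast, hne, List.isEmpty_iff]
          · rw [show pvBStep out c = out ++ ['-'] by
              rw [pvBStep]; simp [hmem, hsp, hlast, hd]]
            rw [ih (out ++ ['-'])]
            simp only [List.isEmpty_iff, List.append_eq_nil_iff, List.getLast?_concat]
            simp only [List.filter_cons, hkeep, if_pos, List.map_cons, hdash]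
            rw [show pvSq (out.isEmpty || (some d == some '-'))
                ('-' :: ((rest.filter pvKeep).map pvDash)) =
                '-' :: pvSq true ((rest.filter pvKeep).map pvDash) by
              have h1 : out.isEmpty = false := by simp [List.isEmpty_iff, hne]
              have h2 : (some d == some '-') = false := by simpa using hd
              simp [h1, h2, pvSq]]
            simp [pvSq]
      · have hc1 : ¬ c = ' ' := fun e => hsp (Or.inl e)
        have hc2 : ¬ c = '-' := fun e => hsp (Or.inr e)
        have hdash : pvDash c = c := by simp [pvDash, hc1]
        rw [show pvBStep out c = out ++ [c] by rw [pvBStep]; simp [hmem, hsp]]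
        rw [ih (out ++ [c])]
        simp only [List.isEmpty_iff, List.append_eq_nil_iff, List.getLast?_concat]
        simp only [List.filter_cons, hkeep, if_pos, List.map_cons, hdash]
        have h2 : (some c == some '-') = false := by simpa using hc2
        have h3 : (out ++ [c]).isEmpty = false := by simp
        simp [h2, h3, pvSq, hc2]

-- ===== VERDICT (by name: the statement is the Claim_ definition above) =====
theorem generate_handle_spec : Claim_equal_generate_handle := by
  intro title _
  unfold Spec_generate_handle generate_handle generate_handle_alt
  simp only [pvReplace_del, pvReplace_map]
  rw [pvFilter_chain, pvCollapse_eq, pvStrip_sq, pvFold_inv]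
  simp only [List.nil_append, List.isEmpty_nil, List.getLast?_nil, Bool.true_or]
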